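-- pv_equiv track=rewrite | github.com/RafalLeja/UWr | SI/pracownia3/zad2.py | squash
-- ===== SOURCE A (Python) =====
-- def squash(options):
--   out = []
--   for i in range(len(options[0])):
--     col = []
--     for j in options:
--       col.append(j[i])
--     if col == [col[0]]*len(col):
--       out.append(col[0])
--     else:
--       out.append(' ')
--   return out
-- ===== SOURCE B (Python) =====
-- def squash(options):
--   first = options[0]
--   out = list(first)
--   for row in options[1:]:
--     for i in range(len(first)):
--       if row[i] != first[i]:
--         out[i] = ' '
--   return out
-- ===== Notes on version B (the rewrite author's own statement) =====
-- stated objective: alternative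
-- what changed: Instead of gathering each full column and comparing it to a replicated list, B keeps the first row as a candidate answer and knocks entries down to ' ' while scanning the remaining rows once against the fixed first row.
import Mathlib
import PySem

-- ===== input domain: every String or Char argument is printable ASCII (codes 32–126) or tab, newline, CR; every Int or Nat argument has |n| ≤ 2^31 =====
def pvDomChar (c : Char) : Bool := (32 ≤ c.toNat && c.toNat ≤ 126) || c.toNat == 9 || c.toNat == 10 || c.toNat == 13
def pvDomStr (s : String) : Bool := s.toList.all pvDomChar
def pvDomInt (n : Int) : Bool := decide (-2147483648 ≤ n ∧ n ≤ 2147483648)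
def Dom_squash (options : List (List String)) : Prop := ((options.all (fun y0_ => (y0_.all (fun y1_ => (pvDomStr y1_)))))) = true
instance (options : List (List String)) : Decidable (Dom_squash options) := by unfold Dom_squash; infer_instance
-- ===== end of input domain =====

-- B keeps the first row as the running answer and overwrites disagreeing positions with ' ' in one
-- row-wise pass, instead of A's column-gathering and replicate comparison (alternative decomposition).

-- ===== PORT A =====
-- for i in range(len(options[0])): gather column i, compare to [col[0]]*len(col)
def squash (options : List (List String)) : List String :=
  (PySem.List.pyRange 0 ((options.headD []).length : Int) 1).foldl (fun out i =>
    let col := options.foldl (fun col j => col ++ [PySem.List.pyGetD j i " "]) []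
    if col = List.replicate col.length (PySem.List.pyGetD col 0 " ") then
      out ++ [PySem.List.pyGetD col 0 " "]
    else
      out ++ [" "]) []

-- ===== PORT B =====
-- out = list(options[0]); for row in options[1:]: positions where row differs from options[0] become ' '
def squash_alt (options : List (List String)) : List String :=
  let first := options.headD []
  (options.drop 1).foldl (fun out row =>
    (PySem.List.pyRange 0 (first.length : Int) 1).foldl (fun out i =>
      if PySem.List.pyGetD row i " " ≠ PySem.List.pyGetD first i " " then
        PySem.List.pySetD out i " "
      else out) out) first

-- ===== PRECONDITION & SPEC =====
-- Python A raises IndexError when options is empty (options[0]) or when some row is shorter than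
-- the first row (j[i]); Pre_ excludes exactly those inputs (B raises there as well).
def Pre_squash (options : List (List String)) : Prop :=
  options ≠ [] ∧ ∀ row ∈ options, (options.headD []).length ≤ row.length
instance (options : List (List String)) : Decidable (Pre_squash options) := by
  unfold Pre_squash; infer_instance
def pvWitness_squash : List (List String) := [["a", "b"], ["a", "c"]]
def Spec_squash (options : List (List String)) (out : List String) : Prop := out = squash_alt options
instance (options : List (List String)) (out : List String) : Decidable (Spec_squash options out) := by unfold Spec_squash; infer_instance

-- ===== CLAIM (what is proved, stated in full; the proofs are below) =====
def Claim_equal_squash : Prop := ∀ (options : List (List String)), Dom_squash options → Pre_squash options → Spec_squash options (squash options)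

-- ===== LEMMAS AND PROOFS =====

-- the common value of entry i of both results
def cell (first : List String) (rest : List (List String)) (i : Nat) : String :=
  if rest.all (fun row => row[i]?.getD " " == first[i]?.getD " ") then first[i]?.getD " " else " "

theorem cell_nil (first : List String) (i : Nat) : cell first [] i = first[i]?.getD " " := by
  simp [cell]

theorem cell_append_singleton (first : List String) (S : List (List String))
    (row : List String) (i : Nat) :
    cell first (S ++ [row]) i =
      if row[i]?.getD " " ≠ first[i]?.getD " " then " " else cell first S i := by
  by_cases h : row[i]?.getD " " = first[i]?.getD " "
  · rw [if_neg (by simpa using h)]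
    unfold cell
    have : (S ++ [row]).all (fun r => r[i]?.getD " " == first[i]?.getD " ")
        = S.all (fun r => r[i]?.getD " " == first[i]?.getD " ") := by
      simp [List.all_append, h]
    rw [this]
  · rw [if_pos (by simpa using h), cell, if_neg (by simp [List.all_append, h])]

theorem squash_cons (first : List String) (rest : List (List String)) :
    squash (first :: rest) = (List.range first.length).map (cell first rest) := by
  unfold squash
  simp only [List.headD_cons]
  rw [PySem.List.pyRange_zero_natCast, List.foldl_map]
  trans (List.range first.length).foldl (fun out i => out ++ [cell first rest i]) []
  · apply PySem.List.foldl_congr_mem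
    intro out i _
    simp only [PySem.List.foldl_append_singleton_eq_map, List.nil_append, List.map_cons,
      PySem.List.pyGetD_zero_cons, PySem.List.pyGetD_natCast, List.length_cons, List.length_map,
      List.getD_eq_getElem?_getD]
    by_cases h : rest.all (fun row => row[i]?.getD " " == first[i]?.getD " ")
    · have hcond : first[i]?.getD " " :: rest.map (fun row => row[i]?.getD " ")
          = List.replicate (rest.length + 1) (first[i]?.getD " ") := by
        rw [List.replicate_succ]
        refine congrArg _ (List.eq_replicate_iff.mpr ⟨by simp, ?_⟩)
        intro b hb
        obtain ⟨r, hr, rfl⟩ := List.mem_map.mp hb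
        simpa using List.all_eq_true.mp h r hr
      rw [if_pos hcond, cell, if_pos h]
    · have hcond : ¬ (first[i]?.getD " " :: rest.map (fun row => row[i]?.getD " ")
          = List.replicate (rest.length + 1) (first[i]?.getD " ")) := by
        intro hrep
        apply h
        rw [List.replicate_succ] at hrep
        have htl := (List.cons.injEq _ _ _ _).mp hrep |>.2
        refine List.all_eq_true.mpr fun r hr => ?_
        have hm : r[i]?.getD " " ∈ List.replicate rest.length (first[i]?.getD " ") := by
          rw [← htl]; exact List.mem_map.mpr ⟨r, hr, rfl⟩
        simpa using List.eq_of_mem_replicate hm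
      rw [if_neg hcond, cell, if_neg h]
  · rw [PySem.List.foldl_append_singleton_eq_map, List.nil_append]

theorem set_map_range {α : Type} (n m : Nat) (g : Nat → α) (v : α) (_hm : m < n) :
    ((List.range n).map g).set m v = (List.range n).map (fun i => if i = m then v else g i) := by
  apply List.ext_getElem
  · simp
  · intro i h1 h2
    simp only [List.length_set, List.length_map, List.length_range] at h1
    simp only [List.getElem_set, List.getElem_map, List.getElem_range]
    rcases eq_or_ne m i with rfl | hne
    · simp
    · simp [hne, Ne.symm hne]

theorem inner_loop (first row : List String) (n : Nat) :
    ∀ (m : Nat), m ≤ n → ∀ (f : Nat → String),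
      (List.range m).foldl
        (fun out i => if row[i]?.getD " " ≠ first[i]?.getD " " then out.set i " " else out)
        ((List.range n).map f)
      = (List.range n).map
          (fun i => if i < m ∧ row[i]?.getD " " ≠ first[i]?.getD " " then " " else f i) := by
  intro m
  induction m with
  | zero => intro _ f; simp
  | succ m ih =>
    intro hm f
    rw [List.range_succ, List.foldl_append, ih (Nat.le_of_succ_le hm) f]
    simp only [List.foldl_cons, List.foldl_nil]
    by_cases hd : row[m]?.getD " " = first[m]?.getD " "
    · rw [if_neg (by simpa using hd)]
      refine List.map_congr_left fun i hi => ?_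
      by_cases hi' : i = m
      · subst hi'; simp [hd]
      · have hlt : (i < m + 1) ↔ (i < m) := by omega
        simp only [hlt]
    · rw [if_pos (by simpa using hd), set_map_range n m _ " " hm]
      refine List.map_congr_left fun i hi => ?_
      by_cases hi' : i = m
      · subst hi'; simp [hd]
      · have hlt : (i < m + 1) ↔ (i < m) := by omega
        simp only [hi', hlt, if_false]

theorem outer_loop (first : List String) :
    ∀ (rest S : List (List String)),
      rest.foldl
        (fun out row =>
          (List.range first.length).foldl
            (fun out i => if row[i]?.getD " " ≠ first[i]?.getD " " then out.set i " " else out) out)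
        ((List.range first.length).map (cell first S))
      = (List.range first.length).map (cell first (S ++ rest)) := by
  intro rest
  induction rest with
  | nil => intro S; simp
  | cons row rest ih =>
    intro S
    rw [List.foldl_cons, inner_loop first row first.length first.length (Nat.le_refl _)]
    have hmap : ((List.range first.length).map
          (fun i => if i < first.length ∧ row[i]?.getD " " ≠ first[i]?.getD " " then " "
                    else cell first S i))
        = (List.range first.length).map (cell first (S ++ [row])) := by
      refine List.map_congr_left fun i hi => ?_
      rw [cell_append_singleton]
      have hi' : i < first.length := List.mem_range.mp hi
      by_cases hd : row[i]?.getD " " = first[i]?.getD " " <;> simp [hd, hi']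
    rw [hmap, ih (S ++ [row])]
    simp

theorem squash_alt_cons (first : List String) (rest : List (List String)) :
    squash_alt (first :: rest) = (List.range first.length).map (cell first rest) := by
  unfold squash_alt
  simp only [List.headD_cons, List.drop_succ_cons, List.drop_zero]
  have hbody : ∀ (out : List String) (row : List String),
      (PySem.List.pyRange 0 (first.length : Int) 1).foldl
        (fun out i => if PySem.List.pyGetD row i " " ≠ PySem.List.pyGetD first i " " then
            PySem.List.pySetD out i " " else out) out
      = (List.range first.length).foldl
          (fun out i => if row[i]?.getD " " ≠ first[i]?.getD " " then out.set i " " else out) out := by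
    intro out row
    rw [PySem.List.pyRange_zero_natCast, List.foldl_map]
    apply PySem.List.foldl_congr_mem
    intro acc i _
    simp [PySem.List.pyGetD_natCast, PySem.List.pySetD_natCast, List.getD_eq_getElem?_getD]
  have hfirst : first = (List.range first.length).map (cell first []) := by
    apply List.ext_getElem
    · simp
    · intro i h1 h2
      simp [cell_nil, List.getElem?_eq_getElem h1]
  calc rest.foldl (fun out row =>
          (PySem.List.pyRange 0 (first.length : Int) 1).foldl
            (fun out i => if PySem.List.pyGetD row i " " ≠ PySem.List.pyGetD first i " " then
                PySem.List.pySetD out i " " else out) out) first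
      = rest.foldl (fun out row =>
          (List.range first.length).foldl
            (fun out i => if row[i]?.getD " " ≠ first[i]?.getD " " then out.set i " " else out) out)
          ((List.range first.length).map (cell first [])) := by
        rw [← hfirst]
        apply PySem.List.foldl_congr_mem
        intro acc row _
        exact hbody acc row
    _ = (List.range first.length).map (cell first ([] ++ rest)) := outer_loop first rest []
    _ = (List.range first.length).map (cell first rest) := by simp

-- ===== VERDICT (by name: the statement is the Claim_ definition above) =====
theorem squash_spec : Claim_equal_squash := by
  intro options _ hpre
  obtain ⟨hne, -⟩ := hpre
  obtain ⟨first, rest, rfl⟩ := List.exists_cons_of_ne_nil hne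
  unfold Spec_squash
  rw [squash_cons, squash_alt_cons]
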